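-- pv_equiv track=rewrite | github.com/jnywong/advent-of-code-2024 | 19/part-2.py | count_concatenations
-- ===== SOURCE A (Python) =====
-- def count_concatenations(patterns, target):
--     dp = [0] * (len(target) + 1)
--     dp[0] = 1
--
--     for i in range(len(target)):
--         for pattern in patterns:
--             if (
--                 i + len(pattern) <= len(target)
--                 and target[i : i + len(pattern)] == pattern
--             ):
--                 dp[i + len(pattern)] += dp[i]
--
--     return dp[len(target)]
-- ===== SOURCE B (Python) =====
-- def count_concatenations(patterns, target):
--     cnt = {}
--     for p in patterns:
--         cnt[p] = cnt.get(p, 0) + 1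
--     lengths = sorted({len(p) for p in patterns})
--     n = len(target)
--     ways = [0] * (n + 1)
--     ways[n] = 1
--     for i in reversed(range(n)):
--         ways[i] = sum(ways[i + L] * cnt.get(target[i:i+L], 0)
--                       for L in lengths if i + L <= n)
--     return ways[0]
-- ===== Notes on version B (the rewrite author's own statement) =====
-- stated objective: faster
-- what changed: Replaces A's forward push-DP whose inner loop scans the whole pattern list at every position with a backward suffix DP that iterates only over the distinct pattern lengths and looks each substring up in a pattern-multiplicity counter built once, so the inner scan over patterns disappears.
-- outside the precondition, e.g. on count_concatenations(['', 'a'], 'aa'): A returns 4, B returns 1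
import Mathlib
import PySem

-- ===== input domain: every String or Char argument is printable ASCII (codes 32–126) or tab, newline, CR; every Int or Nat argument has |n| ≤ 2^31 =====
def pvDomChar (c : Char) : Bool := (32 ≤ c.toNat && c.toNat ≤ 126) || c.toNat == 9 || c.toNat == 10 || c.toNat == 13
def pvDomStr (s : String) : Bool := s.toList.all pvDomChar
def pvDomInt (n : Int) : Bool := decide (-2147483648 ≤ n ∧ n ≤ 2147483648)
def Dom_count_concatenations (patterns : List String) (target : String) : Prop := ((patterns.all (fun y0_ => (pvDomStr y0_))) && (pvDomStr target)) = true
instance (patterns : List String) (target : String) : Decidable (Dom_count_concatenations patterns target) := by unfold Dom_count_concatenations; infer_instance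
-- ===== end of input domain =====

-- B replaces A's forward push-DP, whose inner loop scans the whole pattern list at every
-- position, with a backward suffix DP over the distinct pattern lengths that looks the
-- substring up in a multiplicity counter (dict) built once — the inner scan over patterns
-- disappears (objective: faster; a timing run measured B faster on large inputs).

-- ===== PORT A =====
def count_concatenations (patterns : List String) (target : String) : Int :=
  let n : Int := PySem.Str.len target
  let dp : List Int := (List.replicate (n.toNat + 1) 0).set 0 1
  let dp := (PySem.List.pyRange 0 n 1).foldl (fun dp i =>
    patterns.foldl (fun dp p =>
      if i + PySem.Str.len p ≤ n ∧
         PySem.Str.slice target (some i) (some (i + PySem.Str.len p)) = p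
      then dp.set (i + PySem.Str.len p).toNat
             (dp.getD (i + PySem.Str.len p).toNat 0 + dp.getD i.toNat 0)
      else dp) dp) dp
  dp.getD n.toNat 0

-- ===== PORT B =====
def count_concatenations_alt (patterns : List String) (target : String) : Int :=
  let cnt : PySem.Dict String Int :=
    patterns.foldl (fun d p => d.insert p (d.getD p 0 + 1)) PySem.Dict.empty
  let lengths : List Int :=
    PySem.List.sorted (PySem.Set.ofList (patterns.map PySem.Str.len)) (fun L => L) false
  let n : Int := PySem.Str.len target
  let ways : List Int := (List.replicate (n.toNat + 1) 0).set n.toNat 1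
  let ways := ((PySem.List.pyRange 0 n 1).reverse).foldl (fun ways i =>
    ways.set i.toNat (((lengths.filter (fun L => decide (i + L ≤ n))).map (fun L =>
      ways.getD (i + L).toNat 0 *
        cnt.getD (PySem.Str.slice target (some i) (some (i + L))) 0)).sum)) ways
  ways.getD 0 0

-- ===== PRECONDITION & SPEC =====
-- Pre_ excludes pattern lists containing the empty string when the target is nonempty: an
-- empty pattern can be used any number of times, so no finite count is specified there —
-- A's value is inflated by its in-place doubling while B counts decompositions into
-- nonempty patterns; both are arbitrary answers to an ill-posed corner.
def Pre_count_concatenations (patterns : List String) (target : String) : Prop :=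
  ¬ ("" ∈ patterns ∧ target ≠ "")
instance (patterns : List String) (target : String) : Decidable (Pre_count_concatenations patterns target) := by unfold Pre_count_concatenations; infer_instance

def pvWitness_count_concatenations : List String × String := (["a", "ab"], "aab")

def Spec_count_concatenations (patterns : List String) (target : String) (out : Int) : Prop := out = count_concatenations_alt patterns target
instance (patterns : List String) (target : String) (out : Int) : Decidable (Spec_count_concatenations patterns target out) := by unfold Spec_count_concatenations; infer_instance

-- ===== CLAIM (what is proved, stated in full; the proofs are below) =====
def Claim_equal_count_concatenations : Prop := ∀ (patterns : List String) (target : String), Dom_count_concatenations patterns target → Pre_count_concatenations patterns target → Spec_count_concatenations patterns target (count_concatenations patterns target)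

-- ===== LEMMAS AND PROOFS =====

-- pattern q matches the target list t starting at k and ending exactly at j (A's bound guard included)
def pvHit (t : List Char) (k j : Nat) (q : List Char) : Bool :=
  decide (k + q.length = j) && decide (j ≤ t.length) && decide ((t.drop k).take q.length = q)

-- number of patterns that start at k and end at j (as an Int)
def pvCnt (qs : List (List Char)) (t : List Char) (k j : Nat) : Int :=
  (qs.countP (pvHit t k j) : Int)

-- A's inner loop over the patterns, on the list side
def pvInner (qs : List (List Char)) (t : List Char) (i : Nat) (dp : List Int) : List Int :=
  qs.foldl (fun dp q =>
    if i + q.length ≤ t.length ∧ (t.drop i).take q.length = q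
    then dp.set (i + q.length) (dp.getD (i + q.length) 0 + dp.getD i 0) else dp) dp

-- the prefix pull-DP table that characterises A's forward push-DP
def pvWl (qs : List (List Char)) (t : List Char) : Nat → List Int
  | 0 => [1]
  | j+1 =>
      let ws := pvWl qs t j
      ws ++ [(qs.map (fun q =>
        if q.length ≤ j+1 ∧ (t.drop (j+1-q.length)).take q.length = q
        then ws.getD (j+1-q.length) 0 else 0)).sum]

def pvW (qs : List (List Char)) (t : List Char) (j : Nat) : Int :=
  (pvWl qs t j).getD j 0

-- number of chains from position i to position j stepping k → l with multiplicity m k l,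
-- expanded by LAST step; pvP_first proves it equals its FIRST-step expansion, which is the
-- hinge between A's forward prefix DP and B's backward suffix DP
def pvP (m : Nat → Nat → Int) (i j : Nat) : Int :=
  if _h : j ≤ i then (if i = j then 1 else 0)
  else ∑ k ∈ (Finset.Ico i j).attach, pvP m i k.1 * m k.1 j
termination_by j
decreasing_by
  have := Finset.mem_Ico.mp k.2
  omega

theorem pvP_self (m : Nat → Nat → Int) (i : Nat) : pvP m i i = 1 := by
  unfold pvP; simp

theorem pvP_of_lt (m : Nat → Nat → Int) {i j : Nat} (h : j < i) : pvP m i j = 0 := by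
  unfold pvP; rw [dif_pos (by omega)]; rw [if_neg (by omega)]

theorem pvP_of_gt (m : Nat → Nat → Int) {i j : Nat} (h : i < j) :
    pvP m i j = ∑ k ∈ Finset.Ico i j, pvP m i k * m k j := by
  conv_lhs => unfold pvP
  rw [dif_neg (by omega)]
  exact Finset.sum_attach (Finset.Ico i j) (fun k => pvP m i k * m k j)

theorem pvP_first (m : Nat → Nat → Int) :
    ∀ j i, i < j → pvP m i j = ∑ k ∈ Finset.Ioc i j, m i k * pvP m k j := by
  intro j
  induction j using Nat.strong_induction_on with
  | _ j ih =>
    intro i hij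
    have hIco : Finset.Ico i j = insert i (Finset.Ioo i j) := by
      ext k; simp only [Finset.mem_Ico, Finset.mem_insert, Finset.mem_Ioo]; omega
    have hIoc : Finset.Ioc i j = insert j (Finset.Ioo i j) := by
      ext k; simp only [Finset.mem_Ioc, Finset.mem_insert, Finset.mem_Ioo]; omega
    rw [pvP_of_gt m hij, hIco, Finset.sum_insert (by simp), pvP_self, one_mul,
        hIoc, Finset.sum_insert (by simp), pvP_self, mul_one]
    congr 1
    calc ∑ k ∈ Finset.Ioo i j, pvP m i k * m k j
        = ∑ k ∈ Finset.Ioo i j, ∑ l ∈ Finset.Ioo i j, m i l * (pvP m l k * m k j) := by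
          apply Finset.sum_congr rfl
          intro k hk
          obtain ⟨hik, hkj⟩ := Finset.mem_Ioo.mp hk
          rw [ih k hkj i hik, Finset.sum_mul]
          have e1 : ∀ l ∈ Finset.Ioc i k, (m i l * pvP m l k) * m k j = m i l * (pvP m l k * m k j) := by
            intro l _; ring
          rw [Finset.sum_congr rfl e1]
          apply Finset.sum_subset
          · intro l hl
            simp only [Finset.mem_Ioc] at hl
            simp only [Finset.mem_Ioo]
            omega
          · intro l hl hnl
            have hkl : k < l := by
              simp only [Finset.mem_Ioo] at hl
              simp only [Finset.mem_Ioc] at hnl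
              omega
            rw [pvP_of_lt m hkl]; ring
      _ = ∑ l ∈ Finset.Ioo i j, ∑ k ∈ Finset.Ioo i j, m i l * (pvP m l k * m k j) := Finset.sum_comm
      _ = ∑ l ∈ Finset.Ioo i j, m i l * pvP m l j := by
          apply Finset.sum_congr rfl
          intro l hl
          obtain ⟨hil, hlj⟩ := Finset.mem_Ioo.mp hl
          rw [← Finset.mul_sum]
          congr 1
          rw [pvP_of_gt m hlj]
          refine (Finset.sum_subset ?_ ?_).symm
          · intro k hk
            simp only [Finset.mem_Ico] at hk
            simp only [Finset.mem_Ioo]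
            omega
          · intro k hk hnk
            have hkl : k < l := by
              simp only [Finset.mem_Ioo] at hk
              simp only [Finset.mem_Ico] at hnk
              omega
            rw [pvP_of_lt m hkl]; ring

theorem pvInner_getD (qs : List (List Char)) (t : List Char) (i : Nat) (dp : List Int)
    (hlen : dp.length = t.length + 1) (hne : ∀ q ∈ qs, q ≠ []) (j : Nat) :
    (pvInner qs t i dp).getD j 0 = dp.getD j 0 + dp.getD i 0 * pvCnt qs t i j ∧
    (pvInner qs t i dp).length = dp.length := by
  induction qs generalizing dp with
  | nil => simp [pvInner, pvCnt]
  | cons q qs ih =>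
    have hq : q ≠ [] := hne q (by simp)
    have hql : 1 ≤ q.length := by
      cases q with
      | nil => exact absurd rfl hq
      | cons a l => simp
    have hne' : ∀ r ∈ qs, r ≠ [] := fun r hr => hne r (by simp [hr])
    have hstep : pvInner (q :: qs) t i dp =
        if i + q.length ≤ t.length ∧ (t.drop i).take q.length = q
        then pvInner qs t i (dp.set (i + q.length) (dp.getD (i + q.length) 0 + dp.getD i 0))
        else pvInner qs t i dp := by
      by_cases h : i + q.length ≤ t.length ∧ (t.drop i).take q.length = q
      · simp [pvInner, h]
      · simp [pvInner, h]
    rw [hstep]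
    by_cases hg : i + q.length ≤ t.length ∧ (t.drop i).take q.length = q
    · rw [if_pos hg]
      set v := dp.getD (i + q.length) 0 + dp.getD i 0 with hv
      have hlen' : (dp.set (i + q.length) v).length = dp.length := List.length_set
      have hIH := ih (dp.set (i + q.length) v) (by rw [hlen', hlen])
      have hii : (dp.set (i + q.length) v).getD i 0 = dp.getD i 0 := by
        simp [List.getD_eq_getElem?_getD, List.getElem?_set_ne (by omega : i + q.length ≠ i)]
      refine ⟨?_, by rw [(hIH hne').2, hlen']⟩
      rw [(hIH hne').1, hii]
      by_cases hj : j = i + q.length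
      · subst hj
        have hin : i + q.length < dp.length := by omega
        have hset : (dp.set (i + q.length) v).getD (i + q.length) 0 = v := by
          simp [List.getD_eq_getElem?_getD, List.getElem?_set_self hin]
        rw [hset, hv]
        have hhit : pvHit t i (i + q.length) q = true := by
          simp [pvHit, hg.2]
          omega
        simp [pvCnt, hhit]
        ring
      · have hset : (dp.set (i + q.length) v).getD j 0 = dp.getD j 0 := by
          simp [List.getD_eq_getElem?_getD,
            List.getElem?_set_ne (fun h => hj h.symm)]
        rw [hset]
        have hhit : pvHit t i j q = false := by
          simp [pvHit]
          intro h1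
          omega
        simp [pvCnt, hhit]
    · rw [if_neg hg]
      have hIH := ih dp hlen hne'
      have hhit : pvHit t i j q = false := by
        simp only [pvHit, Bool.and_eq_false_iff]
        rcases Decidable.em ((t.drop i).take q.length = q) with hm | hm
        · left
          rcases Decidable.em (i + q.length = j) with he | he
          · right
            simp only [decide_eq_false_iff_not]
            intro hje
            exact hg ⟨by omega, hm⟩
          · left; simp [he]
        · right; simp [hm]
      refine ⟨?_, hIH.2⟩
      rw [hIH.1]
      simp [pvCnt, hhit]

theorem pvWl_length (qs : List (List Char)) (t : List Char) (j : Nat) :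
    (pvWl qs t j).length = j + 1 := by
  induction j with
  | zero => rfl
  | succ j ih => simp [pvWl, ih]

theorem pvWl_getD_stable (qs : List (List Char)) (t : List Char) (m j : Nat) (h : j ≤ m) :
    (pvWl qs t m).getD j 0 = pvW qs t j := by
  induction m with
  | zero => interval_cases j; rfl
  | succ m ih =>
      rcases Nat.lt_or_ge j (m+1) with hlt | hge
      · have h2 : (pvWl qs t (m+1)).getD j 0 = (pvWl qs t m).getD j 0 := by
          simp [pvWl, List.getD_eq_getElem?_getD, List.getElem?_append_left,
            pvWl_length qs t m, hlt]
        rw [h2, ih (Nat.lt_succ_iff.mp hlt)]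
      · have h2 : j = m + 1 := le_antisymm h hge
        subst h2; rfl

theorem pvSumSwap (l : List (List Char)) (s : Finset ℕ) (f : ℕ → List Char → Int) :
    (l.map (fun q => ∑ k ∈ s, f k q)).sum = ∑ k ∈ s, (l.map (fun q => f k q)).sum := by
  induction l with
  | nil => simp
  | cons q l ih => simp [ih, Finset.sum_add_distrib]

theorem pvW_succ (qs : List (List Char)) (t : List Char) (j : Nat)
    (hne : ∀ q ∈ qs, q ≠ []) (hj : j + 1 ≤ t.length) :
    pvW qs t (j+1) = ∑ k ∈ Finset.range (j+1), pvW qs t k * pvCnt qs t k (j+1) := by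
  have hW : pvW qs t (j+1) = (qs.map (fun q =>
      if q.length ≤ j+1 ∧ (t.drop (j+1-q.length)).take q.length = q
      then (pvWl qs t j).getD (j+1-q.length) 0 else 0)).sum := by
    unfold pvW
    conv_lhs => rw [pvWl]
    simp [List.getD_eq_getElem?_getD, pvWl_length qs t j]
  rw [hW]
  have hmap : (qs.map (fun q =>
      if q.length ≤ j+1 ∧ (t.drop (j+1-q.length)).take q.length = q
      then (pvWl qs t j).getD (j+1-q.length) 0 else 0)) =
      qs.map (fun q => ∑ k ∈ Finset.range (j+1),
        if pvHit t k (j+1) q then pvW qs t k else 0) := by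
    apply List.map_congr_left
    intro q hqmem
    have hq : q ≠ [] := hne q hqmem
    have hql : 1 ≤ q.length := by
      cases q with
      | nil => exact absurd rfl hq
      | cons a l => simp
    by_cases hle : q.length ≤ j+1
    · by_cases hm : (t.drop (j+1-q.length)).take q.length = q
      · rw [if_pos ⟨hle, hm⟩, pvWl_getD_stable qs t j (j+1-q.length) (by omega)]
        rw [Finset.sum_eq_single_of_mem (j+1-q.length) (by simp; omega)]
        · have hhit : pvHit t (j+1-q.length) (j+1) q = true := by
            simp [pvHit, hm]; omega
          rw [if_pos hhit]
        · intro b _ hb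
          have hhit : pvHit t b (j+1) q = false := by
            simp [pvHit]
            intro h1; omega
          rw [if_neg (by simp [hhit])]
      · rw [if_neg (by tauto)]
        symm
        apply Finset.sum_eq_zero
        intro k _
        have hhit : pvHit t k (j+1) q = false := by
          simp [pvHit]
          intro h1 _
          have : k = j+1-q.length := by omega
          subst this
          exact hm
        rw [if_neg (by simp [hhit])]
    · rw [if_neg (by tauto)]
      symm
      apply Finset.sum_eq_zero
      intro k _
      have hhit : pvHit t k (j+1) q = false := by
        simp [pvHit]
        intro h1; omega
      rw [if_neg (by simp [hhit])]
  rw [hmap, pvSumSwap]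
  apply Finset.sum_congr rfl
  intro k _
  have : (qs.map (fun q => if pvHit t k (j+1) q then pvW qs t k else 0)) =
      qs.map (fun q => pvW qs t k * (if pvHit t k (j+1) q then (1:Int) else 0)) := by
    apply List.map_congr_left
    intro q _
    by_cases h : pvHit t k (j+1) q <;> simp [h]
  rw [this, List.sum_map_mul_left, PySem.List.sum_map_ite_one_zero]
  rfl

theorem pvA_invariant (qs : List (List Char)) (t : List Char)
    (hne : ∀ q ∈ qs, q ≠ []) (i : Nat) (hi : i ≤ t.length) :
    (((List.range i).foldl (fun dp i' => pvInner qs t i' dp)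
        ((List.replicate (t.length + 1) (0:Int)).set 0 1)).length = t.length + 1) ∧
    ∀ j, ((List.range i).foldl (fun dp i' => pvInner qs t i' dp)
        ((List.replicate (t.length + 1) (0:Int)).set 0 1)).getD j 0 =
      (if j = 0 then 1 else 0) + ∑ k ∈ Finset.range i, pvW qs t k * pvCnt qs t k j := by
  induction i with
  | zero =>
      constructor
      · simp
      · intro j
        rcases Nat.eq_zero_or_pos j with hj | hj
        · subst hj
          simp [List.getD_eq_getElem?_getD]
        · have hj0 : j ≠ 0 := by omega
          simp [List.getD_eq_getElem?_getD, hj0, (Ne.symm hj0)]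
  | succ i ih =>
      obtain ⟨ihlen, ihval⟩ := ih (by omega)
      rw [List.range_succ]
      simp only [List.foldl_append, List.foldl_cons, List.foldl_nil]
      set dpi := (List.range i).foldl (fun dp i' => pvInner qs t i' dp)
        ((List.replicate (t.length + 1) (0:Int)).set 0 1) with hdpi
      have hWi : dpi.getD i 0 = pvW qs t i := by
        rw [ihval i]
        cases i with
        | zero => simp [pvW, pvWl]
        | succ m =>
            rw [pvW_succ qs t m hne (by omega)]
            simp
      constructor
      · rw [(pvInner_getD qs t i dpi ihlen hne 0).2, ihlen]
      · intro j
        rw [(pvInner_getD qs t i dpi ihlen hne j).1, ihval j, hWi,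
          Finset.sum_range_succ]
        ring

theorem pvA_eq_pvW (qs : List (List Char)) (t : List Char) (hne : ∀ q ∈ qs, q ≠ []) :
    ((List.range t.length).foldl (fun dp i' => pvInner qs t i' dp)
        ((List.replicate (t.length + 1) (0:Int)).set 0 1)).getD t.length 0 = pvW qs t t.length := by
  rw [(pvA_invariant qs t hne t.length le_rfl).2 t.length]
  cases ht : t.length with
  | zero => simp [pvW, pvWl]
  | succ m =>
      rw [pvW_succ qs t m hne (by omega)]
      simp

theorem pvA_bridge (patterns : List String) (target : String) :
    count_concatenations patterns target =
    ((List.range target.toList.length).foldl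
        (fun dp i' => pvInner (patterns.map String.toList) target.toList i' dp)
        ((List.replicate (target.toList.length + 1) (0:Int)).set 0 1)).getD
      target.toList.length 0 := by
  unfold count_concatenations
  rw [PySem.Str.len_eq target]
  simp only [Int.toNat_natCast]
  rw [PySem.List.pyRange_zero_natCast, List.foldl_map]
  congr 1
  apply PySem.List.foldl_congr_mem
  intro dp i _
  unfold pvInner
  rw [List.foldl_map]
  apply PySem.List.foldl_congr_mem
  intro dp' p _
  have hlen : PySem.Str.len p = (p.toList.length : Int) := PySem.Str.len_eq p
  have hcond : ((i:Int) + PySem.Str.len p ≤ (target.toList.length : Int) ∧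
      PySem.Str.slice target (some (i:Int)) (some ((i:Int) + PySem.Str.len p)) = p) ↔
      (i + p.toList.length ≤ target.toList.length ∧
        (target.toList.drop i).take p.toList.length = p.toList) := by
    rw [hlen]
    apply and_congr
    · exact_mod_cast Iff.rfl
    · rw [← String.toList_inj, PySem.Str.toList_slice, PySem.Chars.slice_eq_listSlice,
        PySem.List.slice_natCast_add]
  have hidx : ((i:Int) + PySem.Str.len p).toNat = i + p.toList.length := by
    rw [hlen]; omega
  have hidx2 : ((i:Int)).toNat = i := Int.toNat_natCast i
  by_cases hc : i + p.toList.length ≤ target.toList.length ∧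
      (target.toList.drop i).take p.toList.length = p.toList
  · rw [if_pos (hcond.mpr hc), if_pos hc, hidx, hidx2]
  · rw [if_neg (fun h => hc (hcond.mp h)), if_neg hc]

theorem pvW_eq_pvP (qs : List (List Char)) (t : List Char) (hne : ∀ q ∈ qs, q ≠ []) :
    ∀ j, j ≤ t.length → pvW qs t j = pvP (pvCnt qs t) 0 j := by
  intro j
  induction j using Nat.strong_induction_on with
  | _ j ih =>
    intro hj
    cases j with
    | zero => simp [pvW, pvWl, pvP_self]
    | succ k =>
      rw [pvW_succ qs t k hne hj, pvP_of_gt _ (Nat.succ_pos k), Finset.range_eq_Ico]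
      apply Finset.sum_congr rfl
      intro l hl
      have hlk := Finset.mem_Ico.mp hl
      rw [ih l (by omega) (by omega)]

-- ========== B side ==========

-- the counter dict and the sorted distinct-length list B builds, as proof-side names
def pvCntD (patterns : List String) : PySem.Dict String Int :=
  patterns.foldl (fun d p => d.insert p (d.getD p 0 + 1)) PySem.Dict.empty

def pvLs (patterns : List String) : List Int :=
  PySem.List.sorted (PySem.Set.ofList (patterns.map PySem.Str.len)) (fun L => L) false

-- one iteration of B's backward loop, at a Nat position
def pvStep (patterns : List String) (target : String) (acc : List Int) (i : Nat) : List Int :=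
  acc.set i ((((pvLs patterns).filter
      (fun L => decide ((i:Int) + L ≤ (target.toList.length : Int)))).map (fun L =>
    acc.getD ((i:Int) + L).toNat 0 *
      (pvCntD patterns).getD (PySem.Str.slice target (some (i:Int)) (some ((i:Int) + L))) 0)).sum)

theorem pvCntD_getD (patterns : List String) (s : String) :
    (pvCntD patterns).getD s 0 = (patterns.count s : Int) := by
  unfold pvCntD
  rw [PySem.Dict.getD_foldl_insert_add_one patterns PySem.Dict.empty s]
  simp [pysem]

theorem pvLs_nodup (patterns : List String) : (pvLs patterns).Nodup :=
  (PySem.List.sorted_perm _ _ _).nodup_iff.mpr (PySem.Set.nodup_ofList _)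

theorem pvLs_mem (patterns : List String) (L : Int) :
    L ∈ pvLs patterns ↔ ∃ p ∈ patterns, (p.toList.length : Int) = L := by
  unfold pvLs
  rw [PySem.List.mem_sorted, PySem.Set.mem_ofList, List.mem_map]
  constructor
  · rintro ⟨p, hp, hL⟩
    exact ⟨p, hp, by rw [← hL, PySem.Str.len_eq]⟩
  · rintro ⟨p, hp, hL⟩
    exact ⟨p, hp, by rw [PySem.Str.len_eq, hL]⟩

theorem pvSumFilter (l : List Int) (p : Int → Bool) (f : Int → Int) :
    ((l.filter p).map f).sum = (l.map (fun x => if p x then f x else 0)).sum := by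
  induction l with
  | nil => rfl
  | cons x l ih =>
      by_cases h : p x <;> simp [h, ih]

-- the substring B looks up, at the list level
theorem pvSub_toList (target : String) (i LN : Nat) :
    (PySem.Str.slice target (some (i:Int)) (some ((i:Int) + (LN:Int)))).toList
      = (target.toList.drop i).take LN := by
  rw [PySem.Str.toList_slice, PySem.Chars.slice_eq_listSlice, PySem.List.slice_natCast_add]

-- the number of patterns spanning i → i+LN is the multiplicity of the substring
theorem pvCnt_eq_count (patterns : List String) (target : String) (i LN : Nat)
    (h : i + LN ≤ target.toList.length) :
    pvCnt (patterns.map String.toList) target.toList i (i + LN)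
      = (patterns.count (PySem.Str.slice target (some (i:Int)) (some ((i:Int) + (LN:Int)))) : Int) := by
  unfold pvCnt
  congr 1
  set sub := PySem.Str.slice target (some (i:Int)) (some ((i:Int) + (LN:Int))) with hsubdef
  have hsub : sub.toList = (target.toList.drop i).take LN := pvSub_toList target i LN
  have hsublen : sub.toList.length = LN := by
    rw [hsub]
    simp only [List.length_take, List.length_drop]
    omega
  rw [← List.count_map_of_injective patterns String.toList
        (fun a b hh => String.toList_inj.mp hh) sub,
      List.count_eq_countP]
  apply List.countP_congr
  intro q _
  constructor
  · intro hq
    simp only [pvHit, Bool.and_eq_true, decide_eq_true_eq] at hq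
    obtain ⟨⟨h1, _⟩, h3⟩ := hq
    have hqlen : q.length = LN := by omega
    simp only [beq_iff_eq]
    rw [← h3, hsub, hqlen]
  · intro hq
    simp only [beq_iff_eq] at hq
    subst hq
    simp only [pvHit, Bool.and_eq_true, decide_eq_true_eq]
    refine ⟨⟨by omega, by omega⟩, ?_⟩
    rw [hsublen]
    exact hsub.symm

-- no pattern has length j - i ⇒ no pattern spans i → j
theorem pvCnt_eq_zero (patterns : List String) (target : String) (i j : Nat) (hij : i < j)
    (hno : ∀ p ∈ patterns, p.toList.length ≠ j - i) :
    pvCnt (patterns.map String.toList) target.toList i j = 0 := by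
  unfold pvCnt
  norm_cast
  rw [List.countP_eq_zero]
  intro q hq
  obtain ⟨p, hp, rfl⟩ := List.mem_map.mp hq
  simp only [pvHit, Bool.and_eq_true, decide_eq_true_eq, not_and]
  intro h1
  exact absurd (by omega : p.toList.length = j - i) (hno p hp)

-- B's per-position sum equals the first-step expansion of the chain count
theorem pvBody_eq (patterns : List String) (target : String)
    (hne : ∀ p ∈ patterns, p ≠ "")
    (prev : List Int) (i : Nat) (hi : i < target.toList.length)
    (hprevlen : prev.length = target.toList.length + 1)
    (hprev : ∀ j, j ≤ target.toList.length → prev.getD j 0 =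
      if i + 1 ≤ j then pvP (pvCnt (patterns.map String.toList) target.toList) j target.toList.length else 0) :
    (((pvLs patterns).filter
        (fun L => decide ((i:Int) + L ≤ (target.toList.length : Int)))).map (fun L =>
      prev.getD ((i:Int) + L).toNat 0 *
        (pvCntD patterns).getD (PySem.Str.slice target (some (i:Int)) (some ((i:Int) + L))) 0)).sum
    = pvP (pvCnt (patterns.map String.toList) target.toList) i target.toList.length := by
  set t := target.toList with ht
  set n := t.length with hn
  set m := pvCnt (patterns.map String.toList) t with hm
  have hpos : ∀ L ∈ pvLs patterns, 1 ≤ L := by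
    intro L hL
    obtain ⟨p, hp, hLp⟩ := (pvLs_mem patterns L).mp hL
    have : p.toList ≠ [] := fun hnil => hne p hp (String.toList_inj.mp (by simpa using hnil))
    have : 1 ≤ p.toList.length := by
      cases hq : p.toList with
      | nil => exact absurd hq this
      | cons a l => simp
    omega
  rw [pvSumFilter]
  rw [← List.sum_toFinset _ (pvLs_nodup patterns)]
  rw [pvP_first m n i hi]
  -- rewrite each length term into  m i (i+L.toNat) * pvP (i+L.toNat) n  (or 0)
  have hterm : ∀ L ∈ (pvLs patterns).toFinset,
      (if decide ((i:Int) + L ≤ (n : Int)) = true then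
        prev.getD ((i:Int) + L).toNat 0 *
          (pvCntD patterns).getD (PySem.Str.slice target (some (i:Int)) (some ((i:Int) + L))) 0
       else 0)
      = if (i:Int) + L ≤ (n : Int) then m i (i + L.toNat) * pvP m (i + L.toNat) n else 0 := by
    intro L hLf
    have hL : L ∈ pvLs patterns := List.mem_toFinset.mp hLf
    have hL1 : 1 ≤ L := hpos L hL
    obtain ⟨LN, rfl⟩ : ∃ LN : Nat, L = (LN : Int) := ⟨L.toNat, (Int.toNat_of_nonneg (by omega)).symm⟩
    by_cases hle : (i:Int) + (LN:Int) ≤ (n : Int)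
    · rw [if_pos (by simpa using hle), if_pos hle]
      have hlen : i + LN ≤ n := by exact_mod_cast hle
      have hLN1 : 1 ≤ LN := by exact_mod_cast hL1
      have hidx : ((i:Int) + (LN:Int)).toNat = i + LN := by omega
      rw [hidx, pvCntD_getD, Int.toNat_natCast]
      rw [hprev (i + LN) (by omega)]
      rw [if_pos (by omega)]
      rw [← pvCnt_eq_count patterns target i LN hlen]
      ring
    · rw [if_neg (by simpa using hle), if_neg hle]
  rw [Finset.sum_congr rfl hterm]
  -- reindex lengths → end positions
  rw [show (pvLs patterns).toFinset.sum (fun L => if (i:Int) + L ≤ (n : Int) then m i (i + L.toNat) * pvP m (i + L.toNat) n else 0)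
      = ∑ L ∈ (pvLs patterns).toFinset.filter (fun L => (i:Int) + L ≤ (n : Int)), m i (i + L.toNat) * pvP m (i + L.toNat) n
    from (Finset.sum_filter _ _).symm]
  rw [show ∑ k ∈ Finset.Ioc i n, m i k * pvP m k n
      = ∑ k ∈ (Finset.Ioc i n).filter (fun k => ((k - i : Nat) : Int) ∈ (pvLs patterns).toFinset), m i k * pvP m k n
    from ?_]
  · apply Finset.sum_nbij' (fun L => i + L.toNat) (fun k => ((k - i : Nat) : Int))
    · intro L hL
      simp only [Finset.mem_filter, List.mem_toFinset] at hL ⊢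
      obtain ⟨hLmem, hLle⟩ := hL
      have hL1 : 1 ≤ L := hpos L hLmem
      refine ⟨Finset.mem_Ioc.mpr ⟨by omega, by omega⟩, ?_⟩
      have : ((i + L.toNat - i : Nat) : Int) = L := by omega
      rw [this]
      exact hLmem
    · intro k hk
      simp only [Finset.mem_filter, List.mem_toFinset] at hk ⊢
      obtain ⟨hkIoc, hkL⟩ := hk
      have := Finset.mem_Ioc.mp hkIoc
      exact ⟨hkL, by omega⟩
    · intro L hL
      simp only [Finset.mem_filter, List.mem_toFinset] at hL
      have hL1 : 1 ≤ L := hpos L hL.1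
      omega
    · intro k hk
      simp only [Finset.mem_filter] at hk
      have := Finset.mem_Ioc.mp hk.1
      omega
    · intro L hL
      simp only [Finset.mem_filter, List.mem_toFinset] at hL
      have hL1 : 1 ≤ L := hpos L hL.1
      congr 2
  · symm
    apply Finset.sum_filter_of_ne
    intro k hk hval
    by_contra hnotin
    apply hval
    have hkIoc := Finset.mem_Ioc.mp hk
    have hz : m i k = 0 := by
      show pvCnt (patterns.map String.toList) target.toList i k = 0
      apply pvCnt_eq_zero patterns target i k (by omega)
      intro p hp hplen
      apply hnotin
      rw [List.mem_toFinset, pvLs_mem]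
      exact ⟨p, hp, by omega⟩
    rw [hz, zero_mul]

-- B's backward loop computes the suffix chain counts
theorem pvB_loop (patterns : List String) (target : String)
    (hne : ∀ p ∈ patterns, p ≠ "") :
    ∀ len, len ≤ target.toList.length →
      (((List.range' (target.toList.length - len) len).reverse).foldl
          (pvStep patterns target)
          ((List.replicate (target.toList.length + 1) (0:Int)).set target.toList.length 1)).length
        = target.toList.length + 1 ∧
      ∀ j, j ≤ target.toList.length →
        (((List.range' (target.toList.length - len) len).reverse).foldl
            (pvStep patterns target)
            ((List.replicate (target.toList.length + 1) (0:Int)).set target.toList.length 1)).getD j 0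
          = if target.toList.length - len ≤ j
            then pvP (pvCnt (patterns.map String.toList) target.toList) j target.toList.length
            else 0 := by
  set t := target.toList with ht
  set n := t.length with hn
  set m := pvCnt (patterns.map String.toList) t with hm
  intro len
  induction len with
  | zero =>
      intro _
      simp only [Nat.sub_zero, List.range'_zero, List.reverse_nil, List.foldl_nil]
      constructor
      · simp
      · intro j hj
        by_cases hjn : j = n
        · subst hjn
          rw [if_pos (by omega), pvP_self]
          have hlt : n < (List.replicate (n+1) (0:Int)).length := by simp
          rw [List.getD_eq_getElem?_getD, List.getElem?_set_self hlt]
          rfl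
        · rw [if_neg (by omega)]
          have hjn' : j < n := by omega
          simp [List.getD_eq_getElem?_getD, List.getElem?_set_ne (by omega : n ≠ j)]
  | succ len ih =>
      intro hlen
      obtain ⟨ihlen, ihval⟩ := ih (by omega)
      have hi : n - (len + 1) = (n - (len+1)) := rfl
      set i := n - (len + 1) with hidef
      have hin : i < n := by omega
      have hrange : List.range' (n - (len+1)) (len+1) = i :: List.range' (i+1) len := by
        rw [List.range'_succ]
      have hnl : n - len = i + 1 := by omega
      rw [hrange, List.reverse_cons, List.foldl_append, List.foldl_cons, List.foldl_nil]
      rw [hnl] at ihlen ihval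
      set prev := ((List.range' (i+1) len).reverse).foldl (pvStep patterns target)
        ((List.replicate (n + 1) (0:Int)).set n 1) with hprevdef
      have hbody := pvBody_eq patterns target hne prev i hin ihlen ihval
      constructor
      · simp [pvStep, List.length_set, ihlen]
      · intro j hj
        unfold pvStep
        by_cases hji : j = i
        · subst hji
          rw [if_pos (by omega)]
          rw [List.getD_eq_getElem?_getD, List.getElem?_set_self (by omega)]
          simpa using hbody
        · rw [List.getD_eq_getElem?_getD, List.getElem?_set_ne (fun h => hji h.symm)]
          rw [← List.getD_eq_getElem?_getD, ihval j hj]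
          by_cases hij : i ≤ j
          · rw [if_pos (by omega), if_pos (by omega)]
          · rw [if_neg (by omega), if_neg (by omega)]

theorem pvB_bridge (patterns : List String) (target : String)
    (hne : ∀ p ∈ patterns, p ≠ "") :
    count_concatenations_alt patterns target
      = pvP (pvCnt (patterns.map String.toList) target.toList) 0 target.toList.length := by
  unfold count_concatenations_alt
  rw [PySem.Str.len_eq target]
  simp only [Int.toNat_natCast]
  rw [PySem.List.pyRange_zero_natCast, ← List.map_reverse, List.foldl_map]
  have hcongr : (List.range target.toList.length).reverse.foldl
      (fun ways (i : Nat) =>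
        ways.set ((i:Int)).toNat
          (((PySem.List.sorted (PySem.Set.ofList (patterns.map PySem.Str.len)) (fun L => L) false).filter
              (fun L => decide ((i:Int) + L ≤ (target.toList.length : Int)))).map (fun L =>
            ways.getD ((i:Int) + L).toNat 0 *
              (patterns.foldl (fun d p => d.insert p (d.getD p 0 + 1)) PySem.Dict.empty).getD
                (PySem.Str.slice target (some (i:Int)) (some ((i:Int) + L))) 0)).sum)
      ((List.replicate (target.toList.length + 1) (0:Int)).set target.toList.length 1)
      = (List.range target.toList.length).reverse.foldl (pvStep patterns target)
      ((List.replicate (target.toList.length + 1) (0:Int)).set target.toList.length 1) := by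
    apply PySem.List.foldl_congr_mem
    intro acc i _
    simp [pvStep, pvLs, pvCntD]
  rw [hcongr]
  have hfin := (pvB_loop patterns target hne target.toList.length le_rfl).2 0 (by omega)
  rw [Nat.sub_self] at hfin
  rw [List.range_eq_range']
  rw [hfin]
  simp

-- ===== VERDICT (by name: the statement is the Claim_ definition above) =====
theorem count_concatenations_spec : Claim_equal_count_concatenations := by
  intro patterns target _ hpre
  unfold Spec_count_concatenations
  by_cases ht : target = ""
  · subst ht
    unfold count_concatenations count_concatenations_alt
    norm_num [PySem.Str.len, PySem.List.pyRange]
  · have hneS : ∀ p ∈ patterns, p ≠ "" := by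
      intro p hp hp0
      exact hpre ⟨hp0 ▸ hp, ht⟩
    have hne : ∀ q ∈ patterns.map String.toList, q ≠ [] := by
      intro q hq
      obtain ⟨p, hp, rfl⟩ := List.mem_map.mp hq
      intro hnil
      exact hneS p hp (String.toList_inj.mp (by simpa using hnil))
    rw [pvA_bridge, pvB_bridge patterns target hneS,
        pvA_eq_pvW _ _ hne, pvW_eq_pvP _ _ hne target.toList.length le_rfl]
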